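-- pv_equiv track=rewrite | github.com/Banananatwin/common_n_m_gramm_finder | finder.py | count_ngram_combinations
-- ===== SOURCE A (Python) =====
-- def count_ngram_combinations(text, n_grams, m_grams, n, m):
--     """Count occurrences of each (n-gram, m-gram) combination."""
--     counts = {}
--     n_gram_positions = {n_gram: [] for n_gram in n_grams}
--     m_gram_positions = {m_gram: [] for m_gram in m_grams}
--
--     for i in range(len(text) - n + 1):
--         n_gram = text[i : i + n]
--         if n_gram in n_gram_positions:
--             n_gram_positions[n_gram].append(i)
--
--     for i in range(len(text) - m + 1):
--         m_gram = text[i : i + m]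
--         if m_gram in m_gram_positions:
--             m_gram_positions[m_gram].append(i)
--
--     for n_gram in n_grams:
--         for m_gram in m_grams:
--             count = 0
--             for n_pos in n_gram_positions[n_gram]:
--                 if n_pos + n == len(text):
--                     break
--                 if text[n_pos + n : n_pos + n + m] == m_gram:
--                     count += 1
--             counts[(n_gram, m_gram)] = count
--     return counts
-- ===== SOURCE B (Python) =====
-- def count_ngram_combinations(text, n_grams, m_grams, n, m):
--     """Count occurrences of each (n-gram, m-gram) combination.
--
--     One pass over the text: at each position whose n-gram does not end exactly
--     at the end of the text, extract the n-gram and the m-gram that immediately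
--     follows it, and tally the pair in a hash map.
--     """
--     wanted = set(n_grams)
--     occ = {}
--     for i in range(len(text) - n):
--         g = text[i : i + n]
--         if g in wanted:
--             pair = (g, text[i + n : i + n + m])
--             occ[pair] = occ.get(pair, 0) + 1
--     return {(g, h): occ.get((g, h), 0) for g in n_grams for h in m_grams}
-- ===== Notes on version B (the rewrite author's own statement) =====
-- stated objective: alternative
-- what changed: A stores every n-gram's positions and then, for each (n-gram, m-gram) pair, rescans that n-gram's whole position list slicing the text again; B makes one pass over the text, tallying each (n-gram, following m-gram) occurrence in a hash map, and reads every pair's count off the map.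
import Mathlib
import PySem

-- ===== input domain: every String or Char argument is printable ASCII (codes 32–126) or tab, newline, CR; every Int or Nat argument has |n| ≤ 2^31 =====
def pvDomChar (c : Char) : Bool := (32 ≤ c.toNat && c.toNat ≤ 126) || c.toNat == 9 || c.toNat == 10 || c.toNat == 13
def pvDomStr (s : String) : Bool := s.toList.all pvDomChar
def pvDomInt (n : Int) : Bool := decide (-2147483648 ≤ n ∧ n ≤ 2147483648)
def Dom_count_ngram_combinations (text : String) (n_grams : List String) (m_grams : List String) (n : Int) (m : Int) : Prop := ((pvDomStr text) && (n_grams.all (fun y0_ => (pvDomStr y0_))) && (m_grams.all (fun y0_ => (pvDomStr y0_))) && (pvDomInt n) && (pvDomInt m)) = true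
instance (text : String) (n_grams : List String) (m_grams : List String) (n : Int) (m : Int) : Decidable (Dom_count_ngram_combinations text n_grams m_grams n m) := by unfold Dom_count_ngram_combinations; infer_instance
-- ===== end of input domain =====

-- B replaces A's per-(pair) scan over stored n-gram positions by ONE pass over the text that
-- tallies each (n-gram, following m-gram) occurrence in a hash map and reads each pair's count
-- off that map; objective: alternative (a different algorithm of similar measured cost).

-- ===== PORT A =====
-- inner 'for n_pos in …: if n_pos + n == len(text): break; if text[…] == m_gram: count += 1'
def pvBreakCount (text : String) (n : Int) (m : Int) (m_gram : String) : List Int → Int → Int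
  | [], count => count
  | n_pos :: rest, count =>
    if n_pos + n == PySem.Str.len text then count
    else
      pvBreakCount text n m m_gram rest
        (if PySem.Str.slice text (some (n_pos + n)) (some (n_pos + n + m)) == m_gram then
          count + 1
        else count)

def count_ngram_combinations (text : String) (n_grams : List String) (m_grams : List String) (n : Int) (m : Int) : List (String × String × Int) :=
  let n_gram_positions0 : PySem.Dict String (List Int) :=
    n_grams.foldl (fun d g => d.insert g []) PySem.Dict.empty
  let m_gram_positions0 : PySem.Dict String (List Int) :=
    m_grams.foldl (fun d g => d.insert g []) PySem.Dict.empty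
  let n_gram_positions :=
    (PySem.List.pyRange 0 (PySem.Str.len text - n + 1) 1).foldl
      (fun d i =>
        let n_gram := PySem.Str.slice text (some i) (some (i + n))
        if d.contains n_gram then d.modify n_gram [] (fun l => l ++ [i]) else d)
      n_gram_positions0
  let _m_gram_positions :=
    (PySem.List.pyRange 0 (PySem.Str.len text - m + 1) 1).foldl
      (fun d i =>
        let m_gram := PySem.Str.slice text (some i) (some (i + m))
        if d.contains m_gram then d.modify m_gram [] (fun l => l ++ [i]) else d)
      m_gram_positions0
  let counts : PySem.Dict (String × String) Int :=
    n_grams.foldl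
      (fun counts n_gram =>
        m_grams.foldl
          (fun counts m_gram =>
            counts.insert (n_gram, m_gram)
              (pvBreakCount text n m m_gram (n_gram_positions.getD n_gram []) 0))
          counts)
      PySem.Dict.empty
  counts.items.map (fun p => (p.1.1, p.1.2, p.2))

-- ===== PORT B =====
def count_ngram_combinations_alt (text : String) (n_grams : List String) (m_grams : List String) (n : Int) (m : Int) : List (String × String × Int) :=
  let wanted : PySem.Set String := PySem.Set.ofList n_grams
  let occ : PySem.Dict (String × String) Int :=
    (PySem.List.pyRange 0 (PySem.Str.len text - n) 1).foldl
      (fun d i =>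
        let g := PySem.Str.slice text (some i) (some (i + n))
        if PySem.Set.contains wanted g then
          let pair := (g, PySem.Str.slice text (some (i + n)) (some (i + n + m)))
          d.insert pair (d.getD pair 0 + 1)
        else d)
      PySem.Dict.empty
  let res : PySem.Dict (String × String) Int :=
    n_grams.foldl
      (fun res g =>
        m_grams.foldl (fun res h => res.insert (g, h) (occ.getD (g, h) 0)) res)
      PySem.Dict.empty
  res.items.map (fun p => (p.1.1, p.1.2, p.2))

-- ===== PRECONDITION & SPEC =====
def Spec_count_ngram_combinations (text : String) (n_grams : List String) (m_grams : List String) (n : Int) (m : Int) (out : List (String × String × Int)) : Prop := out = count_ngram_combinations_alt text n_grams m_grams n m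
instance (text : String) (n_grams : List String) (m_grams : List String) (n : Int) (m : Int) (out : List (String × String × Int)) : Decidable (Spec_count_ngram_combinations text n_grams m_grams n m out) := by unfold Spec_count_ngram_combinations; infer_instance

-- ===== CLAIM (what is proved, stated in full; the proofs are below) =====
def Claim_equal_count_ngram_combinations : Prop := ∀ (text : String) (n_grams : List String) (m_grams : List String) (n : Int) (m : Int), Dom_count_ngram_combinations text n_grams m_grams n m → Spec_count_ngram_combinations text n_grams m_grams n m (count_ngram_combinations text n_grams m_grams n m)

-- ===== LEMMAS AND PROOFS =====

-- the initial {g: [] for g in gs} dictionary: every lookup with default [] yields []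
theorem pvGetD_init_nil (gs : List String) (d : PySem.Dict String (List Int))
    (hd : ∀ k, d.getD k ([] : List Int) = []) (k : String) :
    (gs.foldl (fun d g => d.insert g ([] : List Int)) d).getD k [] = [] := by
  induction gs generalizing d with
  | nil => exact hd k
  | cons g gs ih =>
      refine ih _ (fun k' => ?_)
      rw [PySem.Dict.getD_insert]
      split <;> simp [hd]

-- the guarded position-collecting loop appends exactly the matching indices to a contained key
theorem pvPosFold (gram : Int → String) (xs : List Int) (d : PySem.Dict String (List Int))
    (g : String) (hg : d.contains g = true) :
    ((xs.foldl (fun d i =>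
        if d.contains (gram i) then d.modify (gram i) [] (fun l => l ++ [i]) else d) d).getD g [],
     (xs.foldl (fun d i =>
        if d.contains (gram i) then d.modify (gram i) [] (fun l => l ++ [i]) else d) d).contains g)
      = (d.getD g [] ++ xs.filter (fun i => gram i == g), true) := by
  induction xs generalizing d with
  | nil => simp [hg]
  | cons i xs ih =>
      simp only [List.foldl_cons, List.filter_cons]
      by_cases hig : gram i = g
      · have hc : (PySem.Dict.contains d (gram i)) = true := hig ▸ hg
        rw [if_pos hc]
        have hg' : (d.modify (gram i) [] (fun l => l ++ [i])).contains g = true := by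
          rw [PySem.Dict.contains_modify]; simp [hg]
        have := ih (d.modify (gram i) [] (fun l => l ++ [i])) hg'
        rw [this]
        simp [hig, PySem.Dict.getD_modify_self]
      · have hne : g ≠ gram i := fun h => hig h.symm
        have step : ∀ d' : PySem.Dict String (List Int), d'.contains g = true →
            ((if d'.contains (gram i) then d'.modify (gram i) [] (fun l => l ++ [i]) else d').getD g [] = d'.getD g [] ∧
             (if d'.contains (gram i) then d'.modify (gram i) [] (fun l => l ++ [i]) else d').contains g = true) := by
          intro d' hg'
          split
          · constructor
            · exact PySem.Dict.getD_modify_of_ne d' [] _ hne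
            · rw [PySem.Dict.contains_modify]; simp [hg']
          · exact ⟨rfl, hg'⟩
        rcases step d hg with ⟨h1, h2⟩
        have := ih _ h2
        rw [this]
        simp [h1, hig]

-- break-free counting: the inner loop is a countP
theorem pvBreakCount_no_break (text : String) (n om : Int) (h : String) (ps : List Int) (c : Int)
    (hnb : ∀ p ∈ ps, p + n ≠ PySem.Str.len text) :
    pvBreakCount text n om h ps c
      = c + (ps.countP (fun p => PySem.Str.slice text (some (p + n)) (some (p + n + om)) == h) : Int) := by
  induction ps generalizing c with
  | nil => simp [pvBreakCount]
  | cons p ps ih =>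
      have hp : (p + n == PySem.Str.len text) = false := by
        simpa using hnb p List.mem_cons_self
      simp only [pvBreakCount, hp, Bool.false_eq_true, if_false, List.countP_cons]
      rw [ih _ (fun q hq => hnb q (List.mem_cons_of_mem _ hq))]
      split <;> simp <;> omega

-- a breaking last element is simply dropped
theorem pvBreakCount_append_break (text : String) (n om : Int) (h : String) (ps : List Int)
    (b : Int) (hb : b + n = PySem.Str.len text) (c : Int) :
    pvBreakCount text n om h (ps ++ [b]) c = pvBreakCount text n om h ps c := by
  induction ps generalizing c with
  | nil => simp [pvBreakCount, hb]
  | cons p ps ih =>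
      simp only [List.cons_append, pvBreakCount]
      split
      · rfl
      · exact ih _

-- a counter loop keyed through a function is a countP
theorem pvCounterKey (key : Int → String × String) (l : List Int)
    (d : PySem.Dict (String × String) Int) (v : String × String) :
    (l.foldl (fun d i => d.insert (key i) (d.getD (key i) 0 + 1)) d).getD v 0
      = d.getD v 0 + (l.countP (fun i => key i == v) : Int) := by
  induction l generalizing d with
  | nil => simp
  | cons i l ih =>
      simp only [List.foldl_cons, List.countP_cons]
      rw [ih]
      by_cases hk : key i = v
      · simp [hk, PySem.Dict.getD_insert_self]; omega
      · rw [PySem.Dict.getD_insert_of_ne _ _ _ (fun e => hk e.symm)]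
        simp [hk]

-- the two per-pair values agree (the heart of the equivalence)
theorem pvValue_eq (text : String) (n_grams : List String) (n m : Int) (g h : String)
    (hg : g ∈ n_grams) :
    pvBreakCount text n m h
      (((PySem.List.pyRange 0 (PySem.Str.len text - n + 1) 1).foldl
        (fun d i =>
          let n_gram := PySem.Str.slice text (some i) (some (i + n))
          if d.contains n_gram then d.modify n_gram [] (fun l => l ++ [i]) else d)
        (n_grams.foldl (fun d g => d.insert g []) PySem.Dict.empty)).getD g []) 0
    = ((PySem.List.pyRange 0 (PySem.Str.len text - n) 1).foldl
        (fun d i =>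
          let gr := PySem.Str.slice text (some i) (some (i + n))
          if PySem.Set.contains (PySem.Set.ofList n_grams) gr then
            let pair := (gr, PySem.Str.slice text (some (i + n)) (some (i + n + m)))
            d.insert pair (d.getD pair 0 + 1)
          else d)
        PySem.Dict.empty).getD (g, h) 0 := by
  classical
  have hc0 : (n_grams.foldl (fun d g => d.insert g ([] : List Int)) PySem.Dict.empty).contains g = true := by
    rw [PySem.Dict.contains_iff_mem_keys, PySem.Dict.keys_foldl_insert, PySem.Dict.keys_empty]
    exact (PySem.Set.mem_ofList n_grams g).mpr hg
  have hgetD0 : (n_grams.foldl (fun d g => d.insert g ([] : List Int)) PySem.Dict.empty).getD g [] = [] :=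
    pvGetD_init_nil n_grams PySem.Dict.empty (fun k => PySem.Dict.getD_empty k []) g
  -- A's stored positions for g are the matching indices of the first range
  have hpos := congrArg Prod.fst
    (pvPosFold (fun i => PySem.Str.slice text (some i) (some (i + n)))
      (PySem.List.pyRange 0 (PySem.Str.len text - n + 1) 1)
      (n_grams.foldl (fun d g => d.insert g ([] : List Int)) PySem.Dict.empty) g hc0)
  simp only [hgetD0, List.nil_append] at hpos
  rw [hpos]
  -- B's tally is a countP over the shorter range
  have hB : ((PySem.List.pyRange 0 (PySem.Str.len text - n) 1).foldl
        (fun d i =>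
          let gr := PySem.Str.slice text (some i) (some (i + n))
          if PySem.Set.contains (PySem.Set.ofList n_grams) gr then
            let pair := (gr, PySem.Str.slice text (some (i + n)) (some (i + n + m)))
            d.insert pair (d.getD pair 0 + 1)
          else d)
        PySem.Dict.empty).getD (g, h) 0
      = ((PySem.List.pyRange 0 (PySem.Str.len text - n) 1).countP
          (fun i => ((PySem.Str.slice text (some i) (some (i + n)),
                      PySem.Str.slice text (some (i + n)) (some (i + n + m))) == (g, h))
            && PySem.Set.contains (PySem.Set.ofList n_grams)
                 (PySem.Str.slice text (some i) (some (i + n)))) : Int) := by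
    show (List.foldl (fun (d : PySem.Dict (String × String) Int) i =>
        if PySem.Set.contains (PySem.Set.ofList n_grams)
            (PySem.Str.slice text (some i) (some (i + n))) = true then
          d.insert
            (PySem.Str.slice text (some i) (some (i + n)),
             PySem.Str.slice text (some (i + n)) (some (i + n + m)))
            (d.getD (PySem.Str.slice text (some i) (some (i + n)),
             PySem.Str.slice text (some (i + n)) (some (i + n + m))) 0 + 1)
        else d)
        PySem.Dict.empty (PySem.List.pyRange 0 (PySem.Str.len text - n) 1)).getD (g, h) 0 = _
    rw [PySem.List.foldl_if_eq_foldl_filter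
          (fun i => PySem.Set.contains (PySem.Set.ofList n_grams)
            (PySem.Str.slice text (some i) (some (i + n))))
          (fun (d : PySem.Dict (String × String) Int) i => d.insert
            (PySem.Str.slice text (some i) (some (i + n)),
             PySem.Str.slice text (some (i + n)) (some (i + n + m)))
            (d.getD (PySem.Str.slice text (some i) (some (i + n)),
             PySem.Str.slice text (some (i + n)) (some (i + n + m))) 0 + 1)),
        pvCounterKey (fun i =>
          (PySem.Str.slice text (some i) (some (i + n)),
           PySem.Str.slice text (some (i + n)) (some (i + n + m)))),
        PySem.Dict.getD_empty, List.countP_filter]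
    simp
  rw [hB]
  by_cases hlen : PySem.Str.len text - n < 0
  · -- both ranges are empty
    rw [PySem.List.pyRange_one_eq_nil (by omega : PySem.Str.len text - n + 1 ≤ 0),
        PySem.List.pyRange_one_eq_nil (by omega : PySem.Str.len text - n ≤ 0)]
    simp [pvBreakCount]
  · rw [Int.not_lt] at hlen
    -- split A's range: the extra last index L - n is exactly the breaking one
    rw [PySem.List.pyRange_one_succ_right hlen, List.filter_append]
    have hnb : ∀ p ∈ (PySem.List.pyRange 0 (PySem.Str.len text - n) 1).filter
        (fun i => PySem.Str.slice text (some i) (some (i + n)) == g),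
        p + n ≠ PySem.Str.len text := by
      intro p hp
      have := (PySem.List.mem_pyRange_one.mp (List.mem_of_mem_filter hp)).2
      omega
    have hA : pvBreakCount text n m h
        ((PySem.List.pyRange 0 (PySem.Str.len text - n) 1).filter
          (fun i => PySem.Str.slice text (some i) (some (i + n)) == g)
          ++ List.filter (fun i => PySem.Str.slice text (some i) (some (i + n)) == g)
               [PySem.Str.len text - n]) 0
      = pvBreakCount text n m h
        ((PySem.List.pyRange 0 (PySem.Str.len text - n) 1).filter
          (fun i => PySem.Str.slice text (some i) (some (i + n)) == g)) 0 := by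
      by_cases hlast : (PySem.Str.slice text (some (PySem.Str.len text - n))
          (some (PySem.Str.len text - n + n)) == g) = true
      · simp only [List.filter_singleton, hlast, cond_true]
        exact pvBreakCount_append_break text n m h _ _ (by omega) 0
      · simp only [Bool.not_eq_true] at hlast
        simp only [List.filter_singleton, hlast, cond_false, List.append_nil]
    rw [hA, pvBreakCount_no_break text n m h _ 0 hnb, List.countP_filter]
    simp only [Int.zero_add]
    congr 1
    apply List.countP_congr
    intro i _
    have hcg : PySem.Set.contains (PySem.Set.ofList n_grams) g = true :=
      (PySem.Set.contains_iff _ _).mpr ((PySem.Set.mem_ofList n_grams g).mpr hg)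
    by_cases he : PySem.Str.slice text (some i) (some (i + n)) = g
    · simp only [he]
      simp
      exact fun _ => hg
    · simp [he, Prod.ext_iff]

-- ===== VERDICT (by name: the statement is the Claim_ definition above) =====
theorem count_ngram_combinations_spec : Claim_equal_count_ngram_combinations := by
  intro text n_grams m_grams n m _
  unfold Spec_count_ngram_combinations count_ngram_combinations count_ngram_combinations_alt
  dsimp only
  congr 1
  congr 1
  apply PySem.List.foldl_congr_mem
  intro acc g hgmem
  apply PySem.List.foldl_congr_mem
  intro acc' h _
  rw [pvValue_eq text n_grams n m g h hgmem]
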